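-- pv_equiv track=rewrite | github.com/JayOneTheSk8/advent-of-code-python | day_3/part_two.py | analyze_binary_list
-- ===== SOURCE A (Python) =====
-- ZEROES = 'zeroes'
--
-- ONES = 'ones'
--
-- def analyze_binary_list(binary_list, position):
--     counts = {
--         ONES: 0,
--         ZEROES: 0
--     }
--
--     for binary_str in binary_list:
--
--         if binary_str[position] == '1':
--             counts[ONES] += 1
--         else:
--             counts[ZEROES] += 1
--
--     return counts
-- ===== SOURCE B (Python) =====
-- ZEROES = 'zeroes'
--
-- ONES = 'ones'
--
-- def analyze_binary_list(binary_list, position):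
--     # Divide-and-conquer: recursively split the index range in half and merge
--     # (ones, zeroes) counts of the two halves.
--     def count_segment(lo, hi):
--         if hi <= lo:
--             return (0, 0)
--         if hi - lo == 1:
--             return (1, 0) if binary_list[lo][position] == '1' else (0, 1)
--         mid = (lo + hi) // 2
--         lo_ones, lo_zeroes = count_segment(lo, mid)
--         hi_ones, hi_zeroes = count_segment(mid, hi)
--         return (lo_ones + hi_ones, lo_zeroes + hi_zeroes)
--
--     ones, zeroes = count_segment(0, len(binary_list))
--     return {ONES: ones, ZEROES: zeroes}
-- ===== Notes on version B (the rewrite author's own statement) =====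
-- stated objective: alternative
-- what changed: Replaces the single left-to-right loop mutating a two-key counter dict by a divide-and-conquer recursion that splits the index range in half and merges (ones, zeroes) pair counts of the two halves.
import Mathlib
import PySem

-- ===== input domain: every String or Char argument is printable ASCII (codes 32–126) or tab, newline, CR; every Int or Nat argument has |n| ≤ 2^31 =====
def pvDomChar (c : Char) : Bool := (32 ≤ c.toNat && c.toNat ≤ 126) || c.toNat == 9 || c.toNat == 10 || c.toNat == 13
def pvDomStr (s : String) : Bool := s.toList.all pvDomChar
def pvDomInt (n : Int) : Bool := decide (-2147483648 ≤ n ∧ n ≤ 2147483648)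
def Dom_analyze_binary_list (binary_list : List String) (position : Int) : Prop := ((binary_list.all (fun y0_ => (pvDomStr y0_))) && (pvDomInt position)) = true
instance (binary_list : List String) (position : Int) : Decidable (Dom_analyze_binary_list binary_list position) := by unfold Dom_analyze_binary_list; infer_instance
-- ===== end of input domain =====

-- B replaces the counter-dict loop by a divide-and-conquer recursion over the index range, merging (ones, zeroes) pairs of the halves.

-- ===== PORT A =====
-- A: initialise counts = {ones: 0, zeroes: 0}, then for each string bump the matching key.
def analyze_binary_list (binary_list : List String) (position : Int) : List (String × Int) :=
  (binary_list.foldl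
    (fun counts binary_str =>
      if PySem.Str.pyGet? binary_str position = some '1' then
        counts.modify "ones" 0 (· + 1)
      else
        counts.modify "zeroes" 0 (· + 1))
    (((PySem.Dict.empty : PySem.Dict String Int).insert "ones" 0).insert "zeroes" 0)).items

-- ===== PORT B =====
-- B's helper count_segment(lo, hi): split [lo, hi) at mid = (lo+hi)//2, merge the pair counts.
-- (lo, hi are always in [0, len]; the recursion only reads binary_list[lo] on singleton ranges,
-- ported as getD since lo < len there.)
def pvCountSegment (binary_list : List String) (position : Int) (lo hi : Nat) : Int × Int :=
  if hi ≤ lo then (0, 0)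
  else if hi - lo = 1 then
    if PySem.Str.pyGet? (binary_list.getD lo "") position = some '1' then (1, 0) else (0, 1)
  else
    let mid := (lo + hi) / 2
    let l := pvCountSegment binary_list position lo mid
    let h := pvCountSegment binary_list position mid hi
    (l.1 + h.1, l.2 + h.2)
termination_by hi - lo
decreasing_by all_goals omega

def analyze_binary_list_alt (binary_list : List String) (position : Int) : List (String × Int) :=
  let oz := pvCountSegment binary_list position 0 binary_list.length
  [("ones", oz.1), ("zeroes", oz.2)]

-- ===== PRECONDITION & SPEC =====
-- Pre_ excludes exactly the inputs where some binary_str[position] raises IndexError in Python.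
def Pre_analyze_binary_list (binary_list : List String) (position : Int) : Prop :=
  ∀ s ∈ binary_list, PySem.Raise.InRange s.toList.length position
instance (binary_list : List String) (position : Int) : Decidable (Pre_analyze_binary_list binary_list position) := by unfold Pre_analyze_binary_list; infer_instance

def pvWitness_analyze_binary_list : List String × Int := (["10", "01", "11"], 1)

def Spec_analyze_binary_list (binary_list : List String) (position : Int) (out : List (String × Int)) : Prop := out = analyze_binary_list_alt binary_list position
instance (binary_list : List String) (position : Int) (out : List (String × Int)) : Decidable (Spec_analyze_binary_list binary_list position out) := by unfold Spec_analyze_binary_list; infer_instance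

-- ===== CLAIM (what is proved, stated in full; the proofs are below) =====
def Claim_equal_analyze_binary_list : Prop := ∀ (binary_list : List String) (position : Int), Dom_analyze_binary_list binary_list position → Pre_analyze_binary_list binary_list position → Spec_analyze_binary_list binary_list position (analyze_binary_list binary_list position)

-- ===== LEMMAS AND PROOFS =====

-- The ones-counting fold (A's hit count) is a shift of its accumulator.
theorem ones_count_shift (position : Int) (t : List String) : ∀ (c : Int),
    t.foldl (fun acc s => if PySem.Str.pyGet? s position = some '1' then acc + 1 else acc) c
      = c + t.foldl (fun acc s => if PySem.Str.pyGet? s position = some '1' then acc + 1 else acc) 0 := by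
  induction t with
  | nil => simp
  | cons x xs ih =>
    intro c
    simp only [List.foldl_cons]
    rw [ih, ih (if PySem.Str.pyGet? x position = some '1' then (0:Int) + 1 else 0)]
    split_ifs <;> omega

-- Loop invariant for A's fold: starting from {ones: a, zeroes: b} the dict stays a two-key
-- literal whose entries grow by the number of hits resp. misses.
theorem analyze_loop_inv (position : Int) (l : List String) (a b : Int) :
    l.foldl
      (fun counts binary_str =>
        if PySem.Str.pyGet? binary_str position = some '1' then
          counts.modify "ones" 0 (· + 1)
        else
          counts.modify "zeroes" 0 (· + 1))
      (PySem.Dict.mk [("ones", a), ("zeroes", b)]) =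
    PySem.Dict.mk
      [("ones", a + l.foldl (fun acc s => if PySem.Str.pyGet? s position = some '1' then acc + 1 else acc) 0),
       ("zeroes", b + ((l.length : Int) -
          l.foldl (fun acc s => if PySem.Str.pyGet? s position = some '1' then acc + 1 else acc) 0))] := by
  induction l generalizing a b with
  | nil => simp
  | cons s t ih =>
    have hsh := ones_count_shift position t
    by_cases h : PySem.Str.pyGet? s position = some '1'
    · simp only [List.foldl_cons, h, if_pos]
      have hmod : (PySem.Dict.mk [("ones", a), ("zeroes", b)]).modify "ones" 0 (· + 1)
          = PySem.Dict.mk [("ones", a + 1), ("zeroes", b)] := by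
        simp [PySem.Dict.modify, PySem.Dict.insert, PySem.Dict.getD, PySem.Dict.get?, PySem.Dict.contains]
      rw [hmod, ih]
      rw [hsh ((0:Int) + 1)]
      congr 2
      · congr 1; omega
      · congr 1
        simp only [List.length_cons]
        push_cast
        ring
    · simp only [List.foldl_cons, h, if_false]
      have hmod : (PySem.Dict.mk [("ones", a), ("zeroes", b)]).modify "zeroes" 0 (· + 1)
          = PySem.Dict.mk [("ones", a), ("zeroes", b + 1)] := by
        simp [PySem.Dict.modify, PySem.Dict.insert, PySem.Dict.getD, PySem.Dict.get?, PySem.Dict.contains]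
      rw [hmod, ih]
      congr 2
      congr 1
      simp only [List.length_cons]
      push_cast
      ring

-- B's segment recursion computes (#hits, #misses) over the index range [lo, hi).
theorem countSegment_spec (binary_list : List String) (position : Int) :
    ∀ n lo hi, hi - lo = n →
    pvCountSegment binary_list position lo hi =
      (((List.range' lo (hi - lo)).countP
          (fun i => PySem.Str.pyGet? (binary_list.getD i "") position == some '1') : Int),
       ((hi - lo : Nat) : Int) -
        ((List.range' lo (hi - lo)).countP
          (fun i => PySem.Str.pyGet? (binary_list.getD i "") position == some '1') : Int)) := by
  intro n
  induction n using Nat.strong_induction_on with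
  | _ n ih =>
    intro lo hi hn
    rw [pvCountSegment]
    by_cases h0 : hi ≤ lo
    · have : hi - lo = 0 := by omega
      simp [h0, this]
    · by_cases h1 : hi - lo = 1
      · simp only [h0, if_false, h1, if_true]
        have hr : List.range' lo 1 = [lo] := rfl
        rw [hr]
        simp only [List.countP_cons, List.countP_nil, Nat.zero_add, beq_iff_eq]
        by_cases hb : PySem.Str.pyGet? (binary_list.getD lo "") position = some '1'
        · rw [if_pos hb, if_pos hb]; norm_num
        · rw [if_neg hb, if_neg hb]; norm_num
      · simp only [h0, if_false, h1, if_false]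
        have hmid1 : lo < (lo + hi) / 2 := by omega
        have hmid2 : (lo + hi) / 2 < hi := by omega
        rw [ih ((lo + hi) / 2 - lo) (by omega) lo ((lo + hi) / 2) rfl,
            ih (hi - (lo + hi) / 2) (by omega) ((lo + hi) / 2) hi rfl]
        have hsplit : List.range' lo (hi - lo) =
            List.range' lo ((lo + hi) / 2 - lo) ++ List.range' ((lo + hi) / 2) (hi - (lo + hi) / 2) := by
          have e1 : lo + 1 * ((lo + hi) / 2 - lo) = (lo + hi) / 2 := by omega
          have hr := @List.range'_append lo ((lo + hi) / 2 - lo) (hi - (lo + hi) / 2) 1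
          rw [e1] at hr
          rw [show hi - lo = ((lo + hi) / 2 - lo) + (hi - (lo + hi) / 2) by omega, ← hr]
        rw [hsplit, List.countP_append]
        simp only [Prod.mk.injEq]
        constructor
        · push_cast; omega
        · omega

-- The index-range count equals the per-element count over the list.
theorem countP_range'_getD (position : Int) :
    ∀ (l : List String) (lo : Nat) (big : List String), big.drop lo = l →
    (List.range' lo l.length).countP
        (fun i => PySem.Str.pyGet? (big.getD i "") position == some '1')
      = l.countP (fun s => PySem.Str.pyGet? s position == some '1') := by
  intro l
  induction l with
  | nil => simp
  | cons x xs ih =>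
    intro lo big hdrop
    have hlo : big.getD lo "" = x := by
      have h0 : big[lo]? = some x := by
        have h := @List.getElem?_drop _ big lo 0
        rw [hdrop] at h
        simpa using h.symm
      simp [List.getD, h0]
    have hnext : big.drop (lo + 1) = xs := by
      have h := congrArg (List.drop 1) hdrop
      rw [List.drop_drop] at h
      simpa [Nat.add_comm] using h
    simp only [List.length_cons, List.range'_succ, List.countP_cons, hlo]
    rw [ih (lo + 1) big hnext]

-- A's fold hit count equals countP, cast to Int.
theorem foldl_count_eq_countP (position : Int) (l : List String) :
    l.foldl (fun acc s => if PySem.Str.pyGet? s position = some '1' then acc + 1 else acc) (0 : Int)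
      = (l.countP (fun s => PySem.Str.pyGet? s position == some '1') : Int) := by
  induction l with
  | nil => simp
  | cons x xs ih =>
    simp only [List.foldl_cons, List.countP_cons]
    rw [ones_count_shift, ih]
    simp only [beq_iff_eq]
    by_cases h : PySem.Str.pyGet? x position = some '1'
    · rw [if_pos h, if_pos h]; push_cast; omega
    · rw [if_neg h, if_neg h]; push_cast; omega

-- ===== VERDICT (by name: the statement is the Claim_ definition above) =====
theorem analyze_binary_list_spec : Claim_equal_analyze_binary_list := by
  intro binary_list position _ _
  unfold Spec_analyze_binary_list analyze_binary_list analyze_binary_list_alt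
  have hinit : ((PySem.Dict.empty : PySem.Dict String Int).insert "ones" 0).insert "zeroes" 0
      = PySem.Dict.mk [("ones", 0), ("zeroes", 0)] := by decide
  rw [hinit, analyze_loop_inv]
  have hseg := countSegment_spec binary_list position (binary_list.length - 0) 0 binary_list.length rfl
  have hcnt := countP_range'_getD position binary_list 0 binary_list (by simp)
  simp only [Nat.sub_zero] at hseg
  rw [hseg, hcnt, foldl_count_eq_countP]
  simp
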